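-- pv_equiv track=rewrite | github.com/miliar/Code_Jam_Webscraper | solutions_python/solutions_year12_round0_nr3/1356.py | get_nb_recycling_sibling
-- ===== SOURCE A (Python) =====
-- def get_nb_recycling_sibling(a,b,d):
-- 	"""
-- 		pre:  1 <= a <= b, d & d is the number of digits of a
-- 		post: a,b,d unchanged &
-- 			  returns the number of numbers that forms a recycled pair with a
-- 			  and that are smaller or equal to b
-- 	"""
-- 	nbs = set()
-- 	recycling = False
-- 	m = a
-- 	for i in range(d):
-- 		m = m + (m % 10) * 10**d
-- 		m = m // 10
-- 		if m > a and m <= b: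
-- 			nbs.add(m)
-- 		if m == a:
-- 			recycling = True
-- 	if recycling:
-- 		return len(nbs)
-- 	else:
-- 		return 0
-- ===== SOURCE B (Python) =====
-- def get_nb_recycling_sibling(a, b, d):
--     # Each rotation computed independently in closed form: moving the last i
--     # digits to the front gives a // 10**i + (a % 10**i) * 10**(d - i).
--     rots = {a // 10 ** i + (a % 10 ** i) * 10 ** (d - i) for i in range(1, d + 1)}
--     if a in rots:
--         return len({r for r in rots if a < r <= b})
--     return 0
-- ===== Notes on version B (the rewrite author's own statement) =====
-- stated objective: simpler
-- what changed: B computes each digit-rotation independently by a closed-form split a//10**i + (a%10**i)*10**(d-i), builds the full rotation set once and then filters it in a separate pass, instead of A's single loop that iteratively mutates m one digit at a time while filtering and flag-setting inline.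
import Mathlib
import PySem

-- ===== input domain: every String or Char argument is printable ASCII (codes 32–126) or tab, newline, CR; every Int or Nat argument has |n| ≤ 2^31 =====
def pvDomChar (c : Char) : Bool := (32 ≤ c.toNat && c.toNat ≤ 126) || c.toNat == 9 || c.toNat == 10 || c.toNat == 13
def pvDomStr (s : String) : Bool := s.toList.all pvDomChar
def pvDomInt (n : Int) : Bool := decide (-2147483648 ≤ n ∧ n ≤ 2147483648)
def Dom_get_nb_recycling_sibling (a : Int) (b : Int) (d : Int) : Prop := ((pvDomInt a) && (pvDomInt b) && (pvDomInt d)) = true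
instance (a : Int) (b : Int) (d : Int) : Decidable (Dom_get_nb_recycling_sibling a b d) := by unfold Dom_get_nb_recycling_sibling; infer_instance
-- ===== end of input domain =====

-- B replaces A's iterative digit-by-digit mutation of m by independent closed-form
-- rotations collected into a set and filtered in a separate pass (objective: simpler).

-- ===== PORT A =====
def get_nb_recycling_sibling (a b d : Int) : Int :=
  let st := (PySem.List.pyRange 0 d 1).foldl
    (fun (st : PySem.Set Int × Bool × Int) _i =>
      let m := PySem.Int.floordiv (st.2.2 + PySem.Int.mod st.2.2 10 * 10 ^ d.toNat) 10
      let nbs := if a < m ∧ m ≤ b then PySem.Set.add st.1 m else st.1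
      let rec' := if m = a then true else st.2.1
      (nbs, rec', m))
    (PySem.Set.empty, false, a)
  if st.2.1 then (st.1.length : Int) else 0

-- ===== PORT B =====
def get_nb_recycling_sibling_alt (a b d : Int) : Int :=
  let rots : PySem.Set Int := PySem.Set.ofList ((PySem.List.pyRange 1 (d+1) 1).map
      (fun i => PySem.Int.floordiv a (10 ^ i.toNat) + PySem.Int.mod a (10 ^ i.toNat) * 10 ^ (d - i).toNat))
  if PySem.Set.contains rots a then
    ((rots.filter (fun r => decide (a < r ∧ r ≤ b))).length : Int)
  else 0

-- ===== PRECONDITION & SPEC =====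
def Spec_get_nb_recycling_sibling (a : Int) (b : Int) (d : Int) (out : Int) : Prop := out = get_nb_recycling_sibling_alt a b d
instance (a : Int) (b : Int) (d : Int) (out : Int) : Decidable (Spec_get_nb_recycling_sibling a b d out) := by unfold Spec_get_nb_recycling_sibling; infer_instance

-- ===== CLAIM (what is proved, stated in full; the proofs are below) =====
def Claim_equal_get_nb_recycling_sibling : Prop := ∀ (a : Int) (b : Int) (d : Int), Dom_get_nb_recycling_sibling a b d → Spec_get_nb_recycling_sibling a b d (get_nb_recycling_sibling a b d)

-- ===== LEMMAS AND PROOFS =====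

-- closed-form rotation: last i digits of the d-digit representation moved to the front
def pvRot (a : Int) (D i : Nat) : Int :=
  PySem.Int.floordiv a (10 ^ i) + PySem.Int.mod a (10 ^ i) * 10 ^ (D - i)

lemma pvRot_zero (a : Int) (D : Nat) : pvRot a D 0 = a := by
  simp [pvRot]

-- a fold whose body ignores the list element is an iterate
lemma pv_foldl_const {α σ : Type} (L : List α) (g : σ → σ) (s : σ) :
    L.foldl (fun s _ => g s) s = g^[L.length] s := by
  induction L generalizing s with
  | nil => rfl
  | cons x t ih => simpa [Function.iterate_succ_apply] using ih (g s)

-- one step of A's loop advances the closed-form rotation index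
lemma pvRot_step (a : Int) (D j : Nat) (hj : j < D) :
    PySem.Int.floordiv (pvRot a D j + PySem.Int.mod (pvRot a D j) 10 * 10 ^ D) 10
      = pvRot a D (j+1) := by
  have h10 : (0:Int) < 10 := by norm_num
  have hpj : (0:Int) < 10 ^ j := by positivity
  have hpj1 : (0:Int) < 10 ^ (j+1) := by positivity
  simp only [pvRot, PySem.Int.floordiv_eq_ediv_of_pos h10, PySem.Int.floordiv_eq_ediv_of_pos hpj,
    PySem.Int.floordiv_eq_ediv_of_pos hpj1, PySem.Int.mod_eq_emod_of_pos h10,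
    PySem.Int.mod_eq_emod_of_pos hpj, PySem.Int.mod_eq_emod_of_pos hpj1]
  set q := a / 10 ^ j with hq
  set r := a % 10 ^ j with hr
  have hr0 : 0 ≤ r := Int.emod_nonneg a (by positivity)
  have hr1 : r < 10 ^ j := Int.emod_lt_of_pos a hpj
  have hq0 : 0 ≤ q % 10 := Int.emod_nonneg q (by norm_num)
  have hq1 : q % 10 < 10 := Int.emod_lt_of_pos q h10
  have e1 : (10:Int) ^ (D - j) = 10 ^ (D - j - 1) * 10 := by
    rw [← pow_succ]; congr 1; omega
  have e2 : (10:Int) ^ D = 10 ^ (D - 1) * 10 := by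
    rw [← pow_succ]; congr 1; omega
  -- m % 10 = q % 10
  have hm : (q + r * 10 ^ (D - j)) % 10 = q % 10 := by
    rw [e1, ← mul_assoc]
    exact Int.add_mul_emod_self_right q (r * 10 ^ (D - j - 1)) 10
  rw [hm]
  -- the division on the left
  have hnum : q + r * 10 ^ (D - j) + q % 10 * 10 ^ D
      = q + (r * 10 ^ (D - j - 1) + q % 10 * 10 ^ (D - 1)) * 10 := by
    rw [e1, e2]; ring
  rw [hnum, Int.add_mul_ediv_right _ _ (by norm_num : (10:Int) ≠ 0)]
  -- the right-hand side
  have ediv1 : a / 10 ^ (j+1) = q / 10 := by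
    rw [pow_succ, ← Int.ediv_ediv_of_nonneg (le_of_lt hpj)]
  have emod1 : a % 10 ^ (j+1) = q % 10 * 10 ^ j + r := by
    have ha : a = (q % 10 * 10 ^ j + r) + (q / 10) * 10 ^ (j+1) := by
      have h1 : 10 ^ j * (a / 10 ^ j) + a % 10 ^ j = a := Int.mul_ediv_add_emod a (10 ^ j)
      have h2 : 10 * (q / 10) + q % 10 = q := Int.mul_ediv_add_emod q 10
      rw [pow_succ]
      nlinarith [h1, h2]
    rw [ha, Int.add_mul_emod_self_right]
    apply Int.emod_eq_of_lt
    · positivity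
    · have : q % 10 * 10 ^ j ≤ 9 * 10 ^ j := by nlinarith
      rw [pow_succ]
      nlinarith
  rw [ediv1, emod1]
  have e3 : (10:Int) ^ j * 10 ^ (D - (j+1)) = 10 ^ (D - 1) := by
    rw [← pow_add]; congr 1; omega
  have e4 : D - (j + 1) = D - j - 1 := by omega
  rw [e4] at e3 ⊢
  linear_combination -(q % 10) * e3

-- invariant of A's loop, phrased as an iterate
lemma pv_invariant (a b : Int) (D : Nat) (j : Nat) (hj : j ≤ D) :
    (fun (st : PySem.Set Int × Bool × Int) =>
       let m := PySem.Int.floordiv (st.2.2 + PySem.Int.mod st.2.2 10 * 10 ^ D) 10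
       let nbs := if a < m ∧ m ≤ b then PySem.Set.add st.1 m else st.1
       let rec' := if m = a then true else st.2.1
       (nbs, rec', m))^[j] (PySem.Set.empty, false, a)
    = (PySem.Set.ofList (((List.range j).map (fun k => pvRot a D (k+1))).filter
          (fun r => decide (a < r ∧ r ≤ b))),
       ((List.range j).map (fun k => pvRot a D (k+1))).contains a,
       pvRot a D j) := by
  induction j with
  | zero => simp [pvRot_zero, PySem.Set.empty, PySem.Set.ofList]
  | succ j ih =>
    rw [Function.iterate_succ_apply', ih (by omega)]
    simp only
    rw [pvRot_step a D j (by omega)]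
    rw [List.range_succ, List.map_append, List.filter_append, List.map_singleton]
    rw [Prod.mk.injEq, Prod.mk.injEq]
    refine ⟨?_, ?_, rfl⟩
    · -- the set component
      by_cases hp : a < pvRot a D (j+1) ∧ pvRot a D (j+1) ≤ b
      · simp only [if_pos hp, List.filter_singleton, decide_eq_true hp]
        rw [PySem.Set.ofList_eq_foldl, PySem.Set.ofList_eq_foldl, List.foldl_append]
        simp
      · simp only [if_neg hp, List.filter_singleton]
        rw [decide_eq_false hp]
        simp
    · -- the recycling flag
      by_cases hm : pvRot a D (j+1) = a
      · simp [hm]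
      · simp [hm, Ne.symm hm]

-- filtering commutes with dedup up to length
lemma pv_len_filter_set (L : List Int) (p : Int → Bool) :
    (PySem.Set.ofList (L.filter p)).length = ((PySem.Set.ofList L).filter p).length := by
  apply List.Perm.length_eq
  rw [List.perm_ext_iff_of_nodup (PySem.Set.nodup_ofList _) ((PySem.Set.nodup_ofList L).filter _)]
  intro x
  simp [PySem.Set.mem_ofList, List.mem_filter]

lemma pv_contains_ofList (L : List Int) (a : Int) :
    PySem.Set.contains (PySem.Set.ofList L) a = L.contains a := by
  simp only [PySem.Set.contains]
  by_cases h : a ∈ L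
  · simp [h, (PySem.Set.mem_ofList L a).2 h]
  · simp [h, mt (PySem.Set.mem_ofList L a).1 h]

-- B's mapped range is exactly the closed-form rotation list
lemma pv_mapB (a d : Int) (hd : 0 ≤ d) :
    (PySem.List.pyRange 1 (d+1) 1).map
      (fun i => PySem.Int.floordiv a (10 ^ i.toNat) + PySem.Int.mod a (10 ^ i.toNat) * 10 ^ (d - i).toNat)
    = (List.range d.toNat).map (fun k => pvRot a d.toNat (k+1)) := by
  rw [PySem.List.pyRange_one, List.map_map]
  have hlen : (d + 1 - 1).toNat = d.toNat := by omega
  rw [hlen]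
  apply List.map_congr_left
  intro k hk
  rw [List.mem_range] at hk
  have h1 : ((1:Int) + (k:Int)).toNat = k + 1 := by omega
  have h2 : (d - (1 + (k:Int))).toNat = d.toNat - (k+1) := by omega
  simp [pvRot, h1, h2]

-- ===== VERDICT (by name: the statement is the Claim_ definition above) =====
theorem get_nb_recycling_sibling_spec : Claim_equal_get_nb_recycling_sibling := by
  intro a b d _dom
  unfold Spec_get_nb_recycling_sibling get_nb_recycling_sibling get_nb_recycling_sibling_alt
  by_cases hd : d ≤ 0
  · rw [PySem.List.pyRange_one_eq_nil hd, PySem.List.pyRange_one_eq_nil (by omega : d + 1 ≤ 1)]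
    simp [PySem.Set.contains, PySem.Set.ofList]
  · push Not at hd
    rw [pv_mapB a d (le_of_lt hd)]
    rw [pv_foldl_const]
    rw [PySem.List.length_pyRange_one]
    have h0 : (d - 0).toNat = d.toNat := by omega
    rw [h0, pv_invariant a b d.toNat d.toNat le_rfl]
    simp only [pv_contains_ofList]
    rw [pv_len_filter_set]
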